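-- pv_equiv track=rewrite | github.com/onionsss11/algorithm | 프로그래머스/unrated/181855. 문자열 묶기/문자열 묶기.py | solution
-- ===== SOURCE A (Python) =====
-- def solution(strArr):
--     length_dict = {}
--     for word in strArr:
--         if len(word) not in length_dict:
--             length_dict[len(word)] = [word]
--         else:
--             length_dict[len(word)].append(word)
--
--     max_group_len = 0
--     for words in length_dict.values():
--         if len(words) > 1 and len(words) > max_group_len:
--             max_group_len = len(words)
--
--     return max_group_len
-- ===== SOURCE B (Python) =====
-- def solution(strArr):
--     best = 0
--     run = 0
--     prev = None
--     for l in sorted(len(w) for w in strArr):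
--         if prev == l:
--             run += 1
--         else:
--             run = 1
--             prev = l
--         if run > 1 and run > best:
--             best = run
--     return best
-- ===== Notes on version B (the rewrite author's own statement) =====
-- stated objective: alternative
-- what changed: Sort-then-scan: B sorts the word lengths and finds the longest run of equal consecutive lengths (keeping only runs longer than 1) in a single linear scan, instead of A's length->bucket dict and bucket-size maximum loop.
import Mathlib
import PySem

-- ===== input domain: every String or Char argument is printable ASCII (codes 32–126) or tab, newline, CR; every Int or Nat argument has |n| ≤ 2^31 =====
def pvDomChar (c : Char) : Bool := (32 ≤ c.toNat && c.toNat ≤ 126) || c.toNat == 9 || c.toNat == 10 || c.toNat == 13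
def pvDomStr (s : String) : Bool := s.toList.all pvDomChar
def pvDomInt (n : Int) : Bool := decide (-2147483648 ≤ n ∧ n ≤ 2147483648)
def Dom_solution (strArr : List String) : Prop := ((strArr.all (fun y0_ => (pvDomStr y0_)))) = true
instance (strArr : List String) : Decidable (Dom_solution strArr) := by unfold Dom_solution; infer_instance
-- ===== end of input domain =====

-- B sorts the word lengths and scans for the longest run (>1) of equal consecutive
-- lengths, replacing A's length→bucket dict and bucket-size maximum loop: a different
-- algorithm (sort + run scan), not faster.

-- ===== PORT A =====
def solution (strArr : List String) : Int :=
  let length_dict : PySem.Dict Int (List String) :=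
    strArr.foldl (fun d word =>
      if d.contains ((PySem.Str.len word : Int)) = false then
        d.insert ((PySem.Str.len word : Int)) [word]
      else
        d.insert ((PySem.Str.len word : Int)) (d.getD ((PySem.Str.len word : Int)) [] ++ [word]))
      PySem.Dict.empty
  length_dict.values.foldl (fun max_group_len words =>
      if (words.length : Int) > 1 ∧ (words.length : Int) > max_group_len then
        (words.length : Int)
      else max_group_len) 0

-- ===== PORT B =====
-- the loop body of Source B: state = (best, run, prev)
def pvStepB (st : Int × Int × Option Int) (l : Int) : Int × Int × Option Int :=
  let run' := if st.2.2 = some l then st.2.1 + 1 else 1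
  let prev' := if st.2.2 = some l then st.2.2 else some l
  let best' := if run' > 1 ∧ run' > st.1 then run' else st.1
  (best', run', prev')

def solution_alt (strArr : List String) : Int :=
  let ls := PySem.List.sorted (strArr.map (fun w => (PySem.Str.len w : Int))) (fun x => x) false
  (ls.foldl pvStepB (0, 0, none)).1

-- ===== PRECONDITION & SPEC =====
def Spec_solution (strArr : List String) (out : Int) : Prop := out = solution_alt strArr
instance (strArr : List String) (out : Int) : Decidable (Spec_solution strArr out) := by unfold Spec_solution; infer_instance

-- ===== CLAIM (what is proved, stated in full; the proofs are below) =====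
def Claim_equal_solution : Prop := ∀ (strArr : List String), Dom_solution strArr → Spec_solution strArr (solution strArr)

-- ===== LEMMAS AND PROOFS =====

-- ---- A side (characterisation: A = running ">1"-max over the counts of the distinct lengths) ----

-- A's branch on `not in` is exactly Python's d[k] = d.get(k, []) + [w], i.e. Dict.modify.
theorem pv_stepA_eq (d : PySem.Dict Int (List String)) (w : String) :
    (if d.contains ((PySem.Str.len w : Int)) = false then
        d.insert ((PySem.Str.len w : Int)) [w]
      else
        d.insert ((PySem.Str.len w : Int)) (d.getD ((PySem.Str.len w : Int)) [] ++ [w]))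
    = d.modify ((PySem.Str.len w : Int)) [] (· ++ [w]) := by
  by_cases h : d.contains ((PySem.Str.len w : Int)) = false
  · rw [if_pos h]
    simp only [PySem.Dict.modify]
    rw [PySem.Dict.getD_of_not_contains d [] h, List.nil_append]
  · rw [if_neg h]
    simp only [PySem.Dict.modify]

-- running max with the ">1" test IS max over the filtered list
theorem pv_foldl_max_filter (cs : List Int) (a : Int) :
    cs.foldl (fun m c => if c > 1 ∧ c > m then c else m) a
      = (cs.filter (fun c => decide (1 < c))).foldl max a := by
  induction cs generalizing a with
  | nil => rfl
  | cons c t ih =>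
    by_cases h : 1 < c
    · simp only [List.foldl_cons, List.filter_cons, h, decide_true, if_pos]
      rw [ih]
      congr 1
      by_cases h2 : c > a
      · simp [h2, max_def]; omega
      · simp [h2, max_def]; omega
    · simp only [List.foldl_cons, List.filter_cons, h, decide_false]
      rw [ih]
      simp

theorem solution_eq_foldl (strArr : List String) :
    solution strArr
      = ((PySem.Set.ofList (strArr.map (fun w => (PySem.Str.len w : Int)))).map
          (fun k => ((strArr.map (fun w => (PySem.Str.len w : Int))).count k : Int))).foldl
          (fun m c => if c > 1 ∧ c > m then c else m) 0 := by
  unfold solution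
  simp only [funext (fun d => funext (pv_stepA_eq d))]
  have hfold :
      strArr.foldl (fun (d : PySem.Dict Int (List String)) w =>
          d.modify ((PySem.Str.len w : Int)) [] (· ++ [w])) PySem.Dict.empty
        = (strArr.map (fun w => ((PySem.Str.len w : Int), w))).foldl
            (fun d p => d.modify p.1 [] (· ++ [p.2])) PySem.Dict.empty := by
    rw [List.foldl_map]
  rw [hfold]
  set pairs := strArr.map (fun w => ((PySem.Str.len w : Int), w)) with hpairs
  set D := pairs.foldl (fun (d : PySem.Dict Int (List String)) p =>
      d.modify p.1 [] (· ++ [p.2])) PySem.Dict.empty with hD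
  have hnodup : D.keys.Nodup := by
    rw [hD]
    have := PySem.Dict.nodup_keys_foldl_modify_key pairs (fun p => p.1) []
      (fun _ p => (· ++ [p.2])) PySem.Dict.empty (by simp)
    simpa using this
  have hkeys : D.keys = PySem.Set.ofList (strArr.map (fun w => (PySem.Str.len w : Int))) := by
    rw [hD]
    have := PySem.Dict.keys_foldl_modify_key pairs (fun p => p.1) []
      (fun _ p => (· ++ [p.2])) PySem.Dict.empty
    simp only [this, PySem.Dict.keys_empty]
    rw [PySem.Set.ofList_eq_foldl, hpairs, List.map_map]
    rfl
  have hgetD : ∀ k, (D.getD k []).length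
      = (strArr.map (fun w => (PySem.Str.len w : Int))).count k := by
    intro k
    rw [hD, PySem.Dict.getD_foldl_modify_append pairs PySem.Dict.empty k]
    simp only [PySem.Dict.getD_empty, List.nil_append, List.length_map, hpairs,
      List.filter_map, List.length_map, List.count, List.countP_map]
    rw [List.countP_eq_length_filter]
    rfl
  rw [PySem.Dict.values_eq_map_keys D hnodup [], List.foldl_map, hkeys]
  rw [List.foldl_map]
  congr 1
  funext m k
  rw [hgetD k]

-- ---- B side ----

-- foldl max is invariant under permutation of the list
theorem pv_foldl_max_perm {l1 l2 : List Int} (h : l1.Perm l2) (a : Int) :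
    l1.foldl max a = l2.foldl max a := by
  induction h generalizing a with
  | nil => rfl
  | cons x _ ih => simp only [List.foldl_cons]; exact ih _
  | swap x y l =>
      simp only [List.foldl_cons]
      congr 1
      omega
  | trans _ _ ih1 ih2 => rw [ih1, ih2]

-- continuing a run: folding pvStepB over copies of x with prev = some x
theorem pv_run_replicate (c : Nat) (x : Int) :
    ∀ (b r : Int), (1 < r → r ≤ b) →
      (List.replicate c x).foldl pvStepB (b, r, some x)
        = ((if 1 < r + c ∧ b < r + c then r + c else b), r + c, some x) := by
  induction c with
  | zero =>
      intro b r hinv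
      rw [List.replicate_zero, List.foldl_nil]
      have h0 : r + ((0:Nat):Int) = r := by push_cast; ring
      rw [h0]
      have hne : ¬ (1 < r ∧ b < r) := by
        by_cases h : 1 < r
        · have := hinv h; omega
        · omega
      rw [if_neg hne]
  | succ c ih =>
      intro b r hinv
      rw [List.replicate_succ, List.foldl_cons]
      have hstep : pvStepB (b, r, some x) x
          = ((if 1 < r + 1 ∧ b < r + 1 then r + 1 else b), r + 1, some x) := by
        simp only [pvStepB]
        constructor
      rw [hstep, ih _ _ (by split_ifs with h <;> omega)]
      have h1 : (r + 1) + (c:Int) = r + ((c+1 : Nat) : Int) := by push_cast; ring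
      rw [h1]
      split_ifs with h2 h3 h3 <;> simp_all <;> omega

-- a sorted list whose elements are all ≥ its repeated minimum x splits into
-- the copies of x followed by the (sorted, all > x) remainder
theorem pv_sorted_split (S : List Int) (x : Int) (hs : S.Pairwise (· ≤ ·))
    (hge : ∀ y ∈ S, x ≤ y) :
    S = List.replicate (S.count x) x ++ S.filter (fun y => !(y == x)) := by
  induction S with
  | nil => rfl
  | cons a t ih =>
      have hge' : ∀ y ∈ t, x ≤ y := fun y hy => hge y (List.mem_cons_of_mem _ hy)
      by_cases hax : a = x
      · subst hax
        have hfx : (a :: t).filter (fun y => !(y == a)) = t.filter (fun y => !(y == a)) := by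
          rw [List.filter_cons]
          simp
        rw [List.count_cons_self, List.replicate_succ, hfx, List.cons_append]
        congr 1
        exact ih (List.Pairwise.sublist (List.sublist_cons_self a t) hs) hge'
      · have hax' : x < a := lt_of_le_of_ne (hge a (List.mem_cons_self)) (Ne.symm hax)
        have hxt : ∀ y ∈ a :: t, x < y := by
          intro y hy
          rcases List.mem_cons.mp hy with h | h
          · omega
          · exact lt_of_lt_of_le hax' ((List.pairwise_cons.mp hs).1 y h)
        have hc : (a :: t).count x = 0 := by
          rw [List.count_eq_zero]
          intro hmem
          exact absurd rfl (ne_of_gt (hxt x hmem))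
        rw [hc, List.replicate_zero, List.nil_append]
        rw [List.filter_eq_self.mpr]
        intro y hy
        have := hxt y hy
        simp only [Bool.not_eq_eq_eq_not, Bool.not_true, beq_eq_false_iff_ne, ne_eq]
        omega

-- main invariant: scanning a sorted list with a fresh prev (smaller than everything)
-- computes the ">1"-filtered max of the counts of its distinct values
theorem pv_main : ∀ (n : Nat) (S : List Int), S.length ≤ n → S.Pairwise (· ≤ ·) →
    ∀ (b r : Int) (p : Option Int), (∀ q, p = some q → ∀ y ∈ S, q < y) → (1 < r → r ≤ b) →
    (S.foldl pvStepB (b, r, p)).1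
      = (((PySem.Set.ofList S).map (fun k => (S.count k : Int))).filter
          (fun c => decide (1 < c))).foldl max b := by
  intro n
  induction n with
  | zero =>
      intro S hlen _ b r p _ _
      have : S = [] := List.eq_nil_of_length_eq_zero (Nat.le_zero.mp hlen)
      subst this; rfl
  | succ n ih =>
      intro S hlen hs b r p hp hinv
      cases hS : S with
      | nil => rfl
      | cons x t =>
        subst hS
        set c : Nat := (x :: t).count x with hc
        set rest : List Int := (x :: t).filter (fun y => !(y == x)) with hrest
        have hge : ∀ y ∈ (x :: t), x ≤ y := by
          intro y hy
          rcases List.mem_cons.mp hy with h | h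
          · omega
          · exact (List.pairwise_cons.mp hs).1 y h
        have hsplit := pv_sorted_split (x :: t) x hs hge
        have hc1 : 1 ≤ c := by
          have : 0 < (x :: t).count x := List.count_pos_iff.mpr List.mem_cons_self
          omega
        have hxrest : x ∉ rest := by
          intro hmem
          have := List.of_mem_filter hmem
          simp at this
        have hrest_gt : ∀ y ∈ rest, x < y := by
          intro y hy
          rw [hrest, List.mem_filter] at hy
          obtain ⟨hmem, hne⟩ := hy
          simp only [Bool.not_eq_eq_eq_not, Bool.not_true, beq_eq_false_iff_ne, ne_eq] at hne
          have := hge y hmem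
          omega
        have hrest_sorted : rest.Pairwise (· ≤ ·) :=
          List.Pairwise.sublist (List.filter_sublist) hs
        have hrest_len : rest.length ≤ n := by
          have h1 := congrArg List.length hsplit
          simp only [List.length_append, List.length_replicate, List.length_cons] at h1
          have h2 : 0 < List.count x (x :: t) := List.count_pos_iff.mpr List.mem_cons_self
          have h3 : (x :: t).length ≤ n + 1 := hlen
          simp only [List.length_cons] at h3
          rw [hrest]
          omega
        -- left side: process the c copies of x, then rest
        have hcount_rest : ∀ k ∈ PySem.Set.ofList rest, rest.count k = (x :: t).count k := by
          intro k hk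
          have hkx : k ≠ x := by
            intro h; subst h; exact hxrest ((PySem.Set.mem_ofList _ _).mp hk)
          have hfx : rest = t.filter (fun y => !(y == x)) := by
            rw [hrest, List.filter_cons]
            simp
          rw [hfx, List.count_filter (by simp [hkx])]
          simp [Ne.symm hkx]
        have hcx : (x :: t).count x = c := rfl
        -- process the run of x's
        have hrun : (List.replicate c x).foldl pvStepB (b, r, p)
            = ((if 1 < (c:Int) ∧ b < (c:Int) then (c:Int) else b), (c:Int), some x) := by
          obtain ⟨c', hc'⟩ : ∃ c', c = c' + 1 := ⟨c - 1, by omega⟩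
          rw [hc', List.replicate_succ, List.foldl_cons]
          have hpx : p ≠ some x := by
            intro h
            exact lt_irrefl x (hp x h x List.mem_cons_self)
          have hstep : pvStepB (b, r, p) x = (b, 1, some x) := by
            simp only [pvStepB, if_neg hpx]
            have : ¬ ((1:Int) > 1 ∧ (1:Int) > b) := by omega
            rw [if_neg this]
          rw [hstep, pv_run_replicate c' x b 1 (by omega)]
          have : (1:Int) + (c':Int) = ((c' + 1 : Nat) : Int) := by push_cast; ring
          rw [this]
      -- assemble
        have hfold : (x :: t).foldl pvStepB (b, r, p)
            = rest.foldl pvStepB ((if 1 < (c:Int) ∧ b < (c:Int) then (c:Int) else b), (c:Int), some x) := by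
          conv_lhs => rw [hsplit]
          rw [List.foldl_append, hrun]
        rw [hfold]
        rw [ih rest hrest_len hrest_sorted _ _ _
            (fun q hq => by cases hq; exact hrest_gt) (by split_ifs with h <;> omega)]
        -- right side: Set.ofList (x :: t) is a permutation of x :: Set.ofList rest
        have hperm : (PySem.Set.ofList (x :: t)).Perm (x :: PySem.Set.ofList rest) := by
          rw [List.perm_ext_iff_of_nodup (PySem.Set.nodup_ofList _)
            (by
              rw [List.nodup_cons]
              exact ⟨fun h => hxrest ((PySem.Set.mem_ofList _ _).mp h), PySem.Set.nodup_ofList _⟩)]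
          intro a
          simp only [PySem.Set.mem_ofList, List.mem_cons]
          constructor
          · rintro (h | h)
            · exact Or.inl h
            · by_cases hax : a = x
              · exact Or.inl hax
              · refine Or.inr ?_
                rw [hrest, List.mem_filter]
                exact ⟨List.mem_cons_of_mem _ h, by simp [hax]⟩
          · rintro (h | h)
            · exact Or.inl h
            · have : a ∈ (x :: t) := List.mem_of_mem_filter (hrest ▸ h)
              exact List.mem_cons.mp this
        have hpermF :
            (((PySem.Set.ofList (x :: t)).map (fun k => ((x :: t).count k : Int))).filter
                (fun c => decide (1 < c))).Perm
              (((x :: PySem.Set.ofList rest).map (fun k => ((x :: t).count k : Int))).filter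
                (fun c => decide (1 < c))) :=
          (hperm.map _).filter _
        rw [pv_foldl_max_perm hpermF b]
        -- peel off the head, rewrite counts in rest
        rw [List.map_cons, hcx]
        have hmap_eq : (PySem.Set.ofList rest).map (fun k => ((x :: t).count k : Int))
            = (PySem.Set.ofList rest).map (fun k => (rest.count k : Int)) := by
          apply List.map_congr_left
          intro k hk
          rw [hcount_rest k hk]
        rw [hmap_eq, List.filter_cons]
        by_cases hc2 : (1:Int) < (c:Int)
        · have hdec : decide (1 < (c:Int)) = true := by simpa using hc2
          rw [if_pos hdec, List.foldl_cons]
          congr 1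
          split_ifs with h3 <;> omega
        · have hdec : ¬ (decide (1 < (c:Int)) = true) := by simpa using hc2
          rw [if_neg hdec]
          congr 1
          rw [if_neg (by omega)]

theorem solution_spec' (strArr : List String) : solution strArr = solution_alt strArr := by
  rw [solution_eq_foldl, pv_foldl_max_filter]
  set L := strArr.map (fun w => (PySem.Str.len w : Int)) with hL
  set S := PySem.List.sorted L (fun x => x) false with hS
  have hSperm : S.Perm L := PySem.List.sorted_perm L (fun x => x) false
  have hRB : solution_alt strArr
      = (((PySem.Set.ofList S).map (fun k => (S.count k : Int))).filter
          (fun c => decide (1 < c))).foldl max 0 := by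
    show (S.foldl pvStepB (0, 0, none)).1 = _
    exact pv_main S.length S le_rfl
      (PySem.List.sorted_pairwise L (fun x => x)) 0 0 none (by intro q h; cases h) (by omega)
  rw [hRB]
  -- the two count-lists are permutations of each other
  have hsetperm : (PySem.Set.ofList L).Perm (PySem.Set.ofList S) := by
    rw [List.perm_ext_iff_of_nodup (PySem.Set.nodup_ofList _) (PySem.Set.nodup_ofList _)]
    intro a
    rw [PySem.Set.mem_ofList _ _, PySem.Set.mem_ofList _ _, hSperm.mem_iff]
  have hmapeq : (PySem.Set.ofList S).map (fun k => (S.count k : Int))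
      = (PySem.Set.ofList S).map (fun k => (L.count k : Int)) := by
    apply List.map_congr_left
    intro k _
    rw [hSperm.count_eq]
  rw [hmapeq]
  exact pv_foldl_max_perm (((hsetperm.map _).filter _)) 0

-- ===== VERDICT (by name: the statement is the Claim_ definition above) =====
theorem solution_spec : Claim_equal_solution := by
  intro strArr _
  exact solution_spec' strArr
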